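-- pv_equiv track=rewrite | github.com/0122heart/PNU | 컴프입_한상곤/202255550_박의진_midterm.py | sum_of_odd
-- ===== SOURCE A (Python) =====
-- def sum_of_odd(numList) :
--     # 값이 없는 경우
--     if(numList) :
--         result = 0
--         for i in numList :
--             # 음수가 존재하면 0 return
--             if(i < 0) :
--                 return 0
--
--             # 홀수이면
--             if(i % 2) :
--                 result += i
--
--         return result
--
--     return 0
-- ===== SOURCE B (Python) =====
-- def sum_of_odd(numList):
--     if numList:
--         vals = list(numList)
--         if any(i < 0 for i in vals):
--             return 0
--         return sum(i for i in vals if i % 2)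
--     return 0
-- ===== Notes on version B (the rewrite author's own statement) =====
-- stated objective: simpler
-- what changed: Replaces A's single interleaved loop with early returns by a check-then-aggregate decomposition: one any() pass for negatives, then a sum over a filtered generator.
import Mathlib
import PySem

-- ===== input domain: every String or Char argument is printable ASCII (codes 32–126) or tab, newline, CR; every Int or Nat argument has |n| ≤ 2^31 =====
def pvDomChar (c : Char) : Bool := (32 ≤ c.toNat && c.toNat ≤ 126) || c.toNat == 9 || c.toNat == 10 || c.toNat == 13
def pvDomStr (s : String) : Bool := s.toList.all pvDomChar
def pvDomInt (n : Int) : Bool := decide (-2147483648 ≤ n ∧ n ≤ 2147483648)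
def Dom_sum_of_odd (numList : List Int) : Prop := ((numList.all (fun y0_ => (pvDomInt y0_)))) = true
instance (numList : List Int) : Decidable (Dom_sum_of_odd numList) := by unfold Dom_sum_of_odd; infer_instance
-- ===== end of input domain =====

-- Header: B replaces A's single early-exit loop by a two-pass check-then-aggregate decomposition (simpler); return-value equivalence only.
-- ===== PORT A =====
-- early-exit loop of A: returns 0 on first negative, else accumulates odd (Python i % 2 truthy) elements
def sumOfOddLoopA : List Int → Int → Int
  | [], result => result
  | i :: rest, result =>
      if i < 0 then 0
      else sumOfOddLoopA rest (if PySem.Int.mod i 2 ≠ 0 then result + i else result)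

def sum_of_odd (numList : List Int) : Int :=
  if numList ≠ [] then sumOfOddLoopA numList 0 else 0

-- ===== PORT B =====
def sum_of_odd_alt (numList : List Int) : Int :=
  if numList ≠ [] then
    if numList.any (fun i => i < 0) then 0
    else (numList.filter (fun i => PySem.Int.mod i 2 ≠ 0)).sum
  else 0

-- ===== PRECONDITION & SPEC =====
def Spec_sum_of_odd (numList : List Int) (out : Int) : Prop := out = sum_of_odd_alt numList
instance (numList : List Int) (out : Int) : Decidable (Spec_sum_of_odd numList out) := by unfold Spec_sum_of_odd; infer_instance

-- ===== CLAIM (what is proved, stated in full; the proofs are below) =====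
def Claim_equal_sum_of_odd : Prop := ∀ (numList : List Int), Dom_sum_of_odd numList → Spec_sum_of_odd numList (sum_of_odd numList)

-- ===== LEMMAS AND PROOFS =====
theorem sumOfOddLoopA_eq (l : List Int) (r : Int) :
    sumOfOddLoopA l r =
      if l.any (fun i => i < 0) then 0
      else r + (l.filter (fun i => PySem.Int.mod i 2 ≠ 0)).sum := by
  induction l generalizing r with
  | nil => simp [sumOfOddLoopA]
  | cons i rest ih =>
      simp only [sumOfOddLoopA, List.any_cons, List.filter_cons]
      by_cases hneg : i < 0
      · simp [hneg]
      · rw [ih]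
        by_cases hodd : PySem.Int.mod i 2 ≠ 0 <;>
          simp [hneg] <;> split_ifs <;> simp <;> ring

-- ===== VERDICT (by name: the statement is the Claim_ definition above) =====
theorem sum_of_odd_spec : Claim_equal_sum_of_odd := by
  intro numList _
  show sum_of_odd numList = sum_of_odd_alt numList
  unfold sum_of_odd sum_of_odd_alt
  by_cases h : numList = []
  · simp [h]
  · simp only [h, ne_eq, not_false_eq_true, if_true]
    rw [sumOfOddLoopA_eq]
    split_ifs <;> simp
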